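-- pv_equiv track=rewrite | github.com/cb299792458/LeetHub | 0885-spiral-matrix-iii/0885-spiral-matrix-iii.py | spiralMatrixIII
-- ===== SOURCE A (Python) =====
-- from typing import List
--
-- def spiralMatrixIII(rows: int, cols: int, rStart: int, cStart: int) -> List[List[int]]:
--     coords = [[rStart,cStart]]
--     dirs = ((0,1), (1,0), (0,-1), (-1,0))
--     r, c = rStart, cStart
--     step = 0
--
--     while len(coords)<rows*cols:
--         (dr,dc) = dirs[step%4]
--         dist = 1 + step//2
--         for _ in range(dist):
--             r += dr
--             c += dc
--             if -1<r<rows and -1<c<cols: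
--                 coords.append([r,c])
--         step+=1
--
--     return coords
-- ===== SOURCE B (Python) =====
-- from typing import List
--
-- def spiralMatrixIII(rows: int, cols: int, rStart: int, cStart: int) -> List[List[int]]:
--     # Segment-based spiral: each straight run's intersection with the grid is
--     # computed in closed form, so out-of-bounds steps are skipped entirely.
--     coords = [[rStart, cStart]]
--     r, c = rStart, cStart
--     step = 0
--     while len(coords) < rows * cols:
--         dist = 1 + step // 2
--         d = step % 4
--         if d == 0:  # right along row r: (r, c+1 .. c+dist)
--             if 0 <= r < rows:
--                 lo = max(c + 1, 0)
--                 hi = min(c + dist, cols - 1)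
--                 coords.extend([r, j] for j in range(lo, hi + 1))
--             c += dist
--         elif d == 1:  # down along column c: (r+1 .. r+dist, c)
--             if 0 <= c < cols:
--                 lo = max(r + 1, 0)
--                 hi = min(r + dist, rows - 1)
--                 coords.extend([i, c] for i in range(lo, hi + 1))
--             r += dist
--         elif d == 2:  # left along row r: (r, c-1 .. c-dist)
--             if 0 <= r < rows:
--                 hi = min(c - 1, cols - 1)
--                 lo = max(c - dist, 0)
--                 coords.extend([r, j] for j in range(hi, lo - 1, -1))
--             c -= dist
--         else:  # up along column c: (r-1 .. r-dist, c)
--             if 0 <= c < cols: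
--                 hi = min(r - 1, rows - 1)
--                 lo = max(r - dist, 0)
--                 coords.extend([i, c] for i in range(hi, lo - 1, -1))
--             r -= dist
--         step += 1
--     return coords
-- ===== Notes on version B (the rewrite author's own statement) =====
-- stated objective: faster
-- what changed: A advances the spiral one cell at a time and bounds-tests every single step; B computes, for each straight spiral segment, its intersection with the grid as a closed-form clamped range and appends those cells directly, so steps outside the grid cost O(1) per segment instead of O(length).
import Mathlib
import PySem

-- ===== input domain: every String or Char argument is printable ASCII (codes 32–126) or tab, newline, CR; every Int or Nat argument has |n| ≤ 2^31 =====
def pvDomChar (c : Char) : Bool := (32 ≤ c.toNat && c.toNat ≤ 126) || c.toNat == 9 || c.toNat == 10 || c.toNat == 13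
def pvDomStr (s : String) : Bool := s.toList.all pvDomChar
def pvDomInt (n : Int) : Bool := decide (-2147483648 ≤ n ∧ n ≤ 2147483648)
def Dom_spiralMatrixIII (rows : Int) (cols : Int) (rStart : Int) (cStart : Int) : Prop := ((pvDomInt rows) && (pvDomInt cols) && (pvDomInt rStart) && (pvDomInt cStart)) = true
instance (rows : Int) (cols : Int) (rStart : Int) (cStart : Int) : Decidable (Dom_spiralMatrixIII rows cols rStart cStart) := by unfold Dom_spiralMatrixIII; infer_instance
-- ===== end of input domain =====

-- B replaces A's cell-by-cell walk (a bounds test on every single step) by computing each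
-- straight spiral segment's intersection with the grid in closed form; a timing run
-- decides whether that is measurably faster.  Both while-loops are ported with the same
-- explicit fuel bound, which suffices on
-- every input on which the Python loop terminates (the two loops are proved equal step
-- for step, for every fuel).

-- ===== PORT A =====

-- fuel for the two while-loops: on every input on which the Python loops stop, they stop
-- within this many iterations (the spiral ring entered at step s has radius about s/4)
def pvFuel (rows : Int) (cols : Int) (rStart : Int) (cStart : Int) : Nat :=
  ((rows + cols) * 4).toNat + (rStart.natAbs + cStart.natAbs) * 4 + 16

def pvDirs : List (Int × Int) := [(0,1),(1,0),(0,-1),(-1,0)]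

-- the inner "for _ in range(dist)" loop of A, updating (coords, r, c)
def pvSegA (rows : Int) (cols : Int) (dr : Int) (dc : Int) :
    Nat → Int → Int → List (List Int) → List (List Int) × Int × Int
  | 0, r, c, coords => (coords, r, c)
  | n+1, r, c, coords =>
    let r' := r + dr
    let c' := c + dc
    let coords' := if -1 < r' ∧ r' < rows ∧ -1 < c' ∧ c' < cols then coords ++ [[r', c']] else coords
    pvSegA rows cols dr dc n r' c' coords'

-- the outer "while len(coords) < rows*cols" loop of A
def pvLoopA (rows : Int) (cols : Int) :
    Nat → Int → Int → Int → List (List Int) → List (List Int)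
  | 0, _, _, _, coords => coords
  | fuel+1, r, c, step, coords =>
    if (coords.length : Int) < rows * cols then
      let p := PySem.List.pyGetD pvDirs (PySem.Int.mod step 4) (0,0)
      let dist := 1 + PySem.Int.floordiv step 2
      let res := pvSegA rows cols p.1 p.2 dist.toNat r c coords
      pvLoopA rows cols fuel res.2.1 res.2.2 (step+1) res.1
    else coords

def spiralMatrixIII (rows : Int) (cols : Int) (rStart : Int) (cStart : Int) : List (List Int) :=
  pvLoopA rows cols (pvFuel rows cols rStart cStart) rStart cStart 0 [[rStart, cStart]]

-- ===== PORT B =====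

-- the "while" loop of B: one closed-form grid intersection per straight segment
def pvLoopB (rows : Int) (cols : Int) :
    Nat → Int → Int → Int → List (List Int) → List (List Int)
  | 0, _, _, _, coords => coords
  | fuel+1, r, c, step, coords =>
    if (coords.length : Int) < rows * cols then
      let dist := 1 + PySem.Int.floordiv step 2
      let d := PySem.Int.mod step 4
      if d = 0 then
        let seg := if 0 ≤ r ∧ r < rows then
            (PySem.List.pyRange (max (c+1) 0) (min (c+dist) (cols-1) + 1) 1).map (fun j => [r, j])
          else []
        pvLoopB rows cols fuel r (c+dist) (step+1) (coords ++ seg)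
      else if d = 1 then
        let seg := if 0 ≤ c ∧ c < cols then
            (PySem.List.pyRange (max (r+1) 0) (min (r+dist) (rows-1) + 1) 1).map (fun i => [i, c])
          else []
        pvLoopB rows cols fuel (r+dist) c (step+1) (coords ++ seg)
      else if d = 2 then
        let seg := if 0 ≤ r ∧ r < rows then
            (PySem.List.pyRange (min (c-1) (cols-1)) (max (c-dist) 0 - 1) (-1)).map (fun j => [r, j])
          else []
        pvLoopB rows cols fuel r (c-dist) (step+1) (coords ++ seg)
      else
        let seg := if 0 ≤ c ∧ c < cols then
            (PySem.List.pyRange (min (r-1) (rows-1)) (max (r-dist) 0 - 1) (-1)).map (fun i => [i, c])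
          else []
        pvLoopB rows cols fuel (r-dist) c (step+1) (coords ++ seg)
    else coords

def spiralMatrixIII_alt (rows : Int) (cols : Int) (rStart : Int) (cStart : Int) : List (List Int) :=
  pvLoopB rows cols (pvFuel rows cols rStart cStart) rStart cStart 0 [[rStart, cStart]]

-- ===== PRECONDITION & SPEC =====
def Spec_spiralMatrixIII (rows : Int) (cols : Int) (rStart : Int) (cStart : Int) (out : List (List Int)) : Prop := out = spiralMatrixIII_alt rows cols rStart cStart
instance (rows : Int) (cols : Int) (rStart : Int) (cStart : Int) (out : List (List Int)) : Decidable (Spec_spiralMatrixIII rows cols rStart cStart out) := by unfold Spec_spiralMatrixIII; infer_instance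

-- ===== CLAIM (what is proved, stated in full; the proofs are below) =====
def Claim_equal_spiralMatrixIII : Prop := ∀ (rows : Int) (cols : Int) (rStart : Int) (cStart : Int), Dom_spiralMatrixIII rows cols rStart cStart → Spec_spiralMatrixIII rows cols rStart cStart (spiralMatrixIII rows cols rStart cStart)

-- ===== LEMMAS AND PROOFS =====

theorem pvSegA_right (rows cols : Int) : ∀ (n : Nat) (r c : Int) (coords : List (List Int)),
    pvSegA rows cols 0 1 n r c coords =
      (coords ++ (if 0 ≤ r ∧ r < rows then
          (PySem.List.pyRange (max (c+1) 0) (min (c+(n:Int)) (cols-1) + 1) 1).map (fun j => [r, j])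
        else []), r, c + (n:Int)) := by
  intro n
  induction n with
  | zero =>
    intro r c coords
    simp only [pvSegA, Nat.cast_zero, add_zero]
    rw [PySem.List.pyRange_one_eq_nil (by omega)]
    simp
  | succ n ih =>
    intro r c coords
    simp only [pvSegA, add_zero]
    rw [ih]
    simp only [Prod.mk.injEq]
    refine ⟨?_, trivial, by push_cast; ring⟩
    push_cast
    by_cases hr : 0 ≤ r ∧ r < rows
    · rw [if_pos hr, if_pos hr]
      by_cases hc : 0 ≤ c + 1 ∧ c + 1 < cols
      · rw [if_pos (by omega)]
        have e1 : max (c+1) 0 = c+1 := by omega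
        rw [e1]
        have hcons : PySem.List.pyRange (c+1) (min (c+((n:Int)+1)) (cols-1) + 1) 1
            = (c+1) :: PySem.List.pyRange (c+1+1) (min (c+((n:Int)+1)) (cols-1) + 1) 1 :=
          PySem.List.pyRange_one_cons (by omega)
        rw [hcons]
        have e2 : max (c+1+1) 0 = c+1+1 := by omega
        have e3 : c+1+(n:Int) = c+((n:Int)+1) := by ring
        rw [e2, e3]
        simp
      · rw [if_neg (by omega)]
        by_cases hlo : c+1 < 0
        · have e1 : max (c+1+1) 0 = max (c+1) 0 := by omega
          have e3 : c+1+(n:Int) = c+((n:Int)+1) := by ring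
          rw [e1, e3]
        · rw [PySem.List.pyRange_one_eq_nil (by omega), PySem.List.pyRange_one_eq_nil (by omega)]
    · rw [if_neg hr, if_neg hr, if_neg (by omega)]

theorem pvSegA_down (rows cols : Int) : ∀ (n : Nat) (r c : Int) (coords : List (List Int)),
    pvSegA rows cols 1 0 n r c coords =
      (coords ++ (if 0 ≤ c ∧ c < cols then
          (PySem.List.pyRange (max (r+1) 0) (min (r+(n:Int)) (rows-1) + 1) 1).map (fun i => [i, c])
        else []), r + (n:Int), c) := by
  intro n
  induction n with
  | zero =>
    intro r c coords
    simp only [pvSegA, Nat.cast_zero, add_zero]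
    rw [PySem.List.pyRange_one_eq_nil (by omega)]
    simp
  | succ n ih =>
    intro r c coords
    simp only [pvSegA, add_zero]
    rw [ih]
    simp only [Prod.mk.injEq]
    refine ⟨?_, by push_cast; ring, trivial⟩
    push_cast
    by_cases hc : 0 ≤ c ∧ c < cols
    · rw [if_pos hc, if_pos hc]
      by_cases hrr : 0 ≤ r + 1 ∧ r + 1 < rows
      · rw [if_pos (by omega)]
        have e1 : max (r+1) 0 = r+1 := by omega
        rw [e1]
        have hcons : PySem.List.pyRange (r+1) (min (r+((n:Int)+1)) (rows-1) + 1) 1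
            = (r+1) :: PySem.List.pyRange (r+1+1) (min (r+((n:Int)+1)) (rows-1) + 1) 1 :=
          PySem.List.pyRange_one_cons (by omega)
        rw [hcons]
        have e2 : max (r+1+1) 0 = r+1+1 := by omega
        have e3 : r+1+(n:Int) = r+((n:Int)+1) := by ring
        rw [e2, e3]
        simp
      · rw [if_neg (by omega)]
        by_cases hlo : r+1 < 0
        · have e1 : max (r+1+1) 0 = max (r+1) 0 := by omega
          have e3 : r+1+(n:Int) = r+((n:Int)+1) := by ring
          rw [e1, e3]
        · rw [PySem.List.pyRange_one_eq_nil (by omega), PySem.List.pyRange_one_eq_nil (by omega)]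
    · rw [if_neg hc, if_neg hc, if_neg (by omega)]

theorem pvSegA_left (rows cols : Int) : ∀ (n : Nat) (r c : Int) (coords : List (List Int)),
    pvSegA rows cols 0 (-1) n r c coords =
      (coords ++ (if 0 ≤ r ∧ r < rows then
          (PySem.List.pyRange (min (c-1) (cols-1)) (max (c-(n:Int)) 0 - 1) (-1)).map (fun j => [r, j])
        else []), r, c - (n:Int)) := by
  intro n
  induction n with
  | zero =>
    intro r c coords
    simp only [pvSegA, Nat.cast_zero, sub_zero]
    rw [PySem.List.pyRange_neg_one_eq_nil (by omega)]
    simp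
  | succ n ih =>
    intro r c coords
    simp only [pvSegA, add_zero]
    have hs : c + -1 = c - 1 := by ring
    rw [hs, ih]
    simp only [Prod.mk.injEq]
    refine ⟨?_, trivial, by push_cast; ring⟩
    push_cast
    by_cases hr : 0 ≤ r ∧ r < rows
    · rw [if_pos hr, if_pos hr]
      by_cases hc : 0 ≤ c - 1 ∧ c - 1 < cols
      · rw [if_pos (by omega)]
        have e1 : min (c-1) (cols-1) = c-1 := by omega
        rw [e1]
        have hcons : PySem.List.pyRange (c-1) (max (c-((n:Int)+1)) 0 - 1) (-1)
            = (c-1) :: PySem.List.pyRange (c-1-1) (max (c-((n:Int)+1)) 0 - 1) (-1) :=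
          PySem.List.pyRange_neg_one_cons (by omega)
        rw [hcons]
        have e2 : min (c-1-1) (cols-1) = c-1-1 := by omega
        have e3 : c-1-(n:Int) = c-((n:Int)+1) := by ring
        rw [e2, e3]
        simp
      · rw [if_neg (by omega)]
        by_cases hhi : cols ≤ c - 1
        · have e1 : min (c-1-1) (cols-1) = min (c-1) (cols-1) := by omega
          have e3 : c-1-(n:Int) = c-((n:Int)+1) := by ring
          rw [e1, e3]
        · rw [PySem.List.pyRange_neg_one_eq_nil (by omega), PySem.List.pyRange_neg_one_eq_nil (by omega)]
    · rw [if_neg hr, if_neg hr, if_neg (by omega)]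

theorem pvSegA_up (rows cols : Int) : ∀ (n : Nat) (r c : Int) (coords : List (List Int)),
    pvSegA rows cols (-1) 0 n r c coords =
      (coords ++ (if 0 ≤ c ∧ c < cols then
          (PySem.List.pyRange (min (r-1) (rows-1)) (max (r-(n:Int)) 0 - 1) (-1)).map (fun i => [i, c])
        else []), r - (n:Int), c) := by
  intro n
  induction n with
  | zero =>
    intro r c coords
    simp only [pvSegA, Nat.cast_zero, sub_zero]
    rw [PySem.List.pyRange_neg_one_eq_nil (by omega)]
    simp
  | succ n ih =>
    intro r c coords
    simp only [pvSegA, add_zero]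
    have hs : r + -1 = r - 1 := by ring
    rw [hs, ih]
    simp only [Prod.mk.injEq]
    refine ⟨?_, by push_cast; ring, trivial⟩
    push_cast
    by_cases hc : 0 ≤ c ∧ c < cols
    · rw [if_pos hc, if_pos hc]
      by_cases hrr : 0 ≤ r - 1 ∧ r - 1 < rows
      · rw [if_pos (by omega)]
        have e1 : min (r-1) (rows-1) = r-1 := by omega
        rw [e1]
        have hcons : PySem.List.pyRange (r-1) (max (r-((n:Int)+1)) 0 - 1) (-1)
            = (r-1) :: PySem.List.pyRange (r-1-1) (max (r-((n:Int)+1)) 0 - 1) (-1) :=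
          PySem.List.pyRange_neg_one_cons (by omega)
        rw [hcons]
        have e2 : min (r-1-1) (rows-1) = r-1-1 := by omega
        have e3 : r-1-(n:Int) = r-((n:Int)+1) := by ring
        rw [e2, e3]
        simp
      · rw [if_neg (by omega)]
        by_cases hhi : rows ≤ r - 1
        · have e1 : min (r-1-1) (rows-1) = min (r-1) (rows-1) := by omega
          have e3 : r-1-(n:Int) = r-((n:Int)+1) := by ring
          rw [e1, e3]
        · rw [PySem.List.pyRange_neg_one_eq_nil (by omega), PySem.List.pyRange_neg_one_eq_nil (by omega)]
    · rw [if_neg hc, if_neg hc, if_neg (by omega)]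

theorem pvLoop_eq (rows cols : Int) : ∀ (fuel : Nat) (r c step : Int) (coords : List (List Int)),
    0 ≤ step → pvLoopA rows cols fuel r c step coords = pvLoopB rows cols fuel r c step coords := by
  intro fuel
  induction fuel with
  | zero => intro r c step coords _; rfl
  | succ fuel ih =>
    intro r c step coords hstep
    simp only [pvLoopA, pvLoopB]
    by_cases hlen : (coords.length : Int) < rows * cols
    · rw [if_pos hlen, if_pos hlen]
      have hmodlo : 0 ≤ PySem.Int.mod step 4 := PySem.Int.mod_nonneg step (by omega)
      have hmodhi : PySem.Int.mod step 4 < 4 := PySem.Int.mod_lt step (by omega)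
      have hdiv : 0 ≤ PySem.Int.floordiv step 2 := by
        rw [PySem.Int.floordiv_eq_ediv_of_pos (by omega)]
        exact Int.ediv_nonneg hstep (by omega)
      have hdist : ((1 + PySem.Int.floordiv step 2).toNat : Int) = 1 + PySem.Int.floordiv step 2 :=
        Int.toNat_of_nonneg (by omega)
      have hd : PySem.Int.mod step 4 = 0 ∨ PySem.Int.mod step 4 = 1 ∨
          PySem.Int.mod step 4 = 2 ∨ PySem.Int.mod step 4 = 3 := by omega
      rcases hd with hd | hd | hd | hd <;> rw [hd]
      · have hp : PySem.List.pyGetD pvDirs ((0 : Int)) ((0:Int), (0:Int)) = (0, 1) := by decide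
        rw [hp]
        rw [pvSegA_right]
        rw [hdist]
        exact ih _ _ _ _ (by omega)
      · have hp : PySem.List.pyGetD pvDirs ((1 : Int)) ((0:Int), (0:Int)) = (1, 0) := by decide
        rw [hp]
        rw [pvSegA_down]
        rw [hdist]
        exact ih _ _ _ _ (by omega)
      · have hp : PySem.List.pyGetD pvDirs ((2 : Int)) ((0:Int), (0:Int)) = (0, -1) := by decide
        rw [hp]
        rw [pvSegA_left]
        rw [hdist]
        exact ih _ _ _ _ (by omega)
      · have hp : PySem.List.pyGetD pvDirs ((3 : Int)) ((0:Int), (0:Int)) = (-1, 0) := by decide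
        rw [hp]
        rw [pvSegA_up]
        rw [hdist]
        exact ih _ _ _ _ (by omega)
    · rw [if_neg hlen, if_neg hlen]

-- ===== VERDICT (by name: the statement is the Claim_ definition above) =====
theorem spiralMatrixIII_spec : Claim_equal_spiralMatrixIII := by
  intro rows cols rStart cStart _
  unfold Spec_spiralMatrixIII spiralMatrixIII spiralMatrixIII_alt
  exact pvLoop_eq rows cols _ rStart cStart 0 _ le_rfl
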